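-- pv_equiv track=rewrite | github.com/EsosaOrumwese/fraud-detection-system | src/fraud_detection/case_mgmt/action_handshake.py | _render_sql
-- ===== SOURCE A (Python) =====
-- def _render_sql(sql: str, backend: str) -> str:
--     rendered = sql
--     if backend == "postgres":
--         for idx in range(1, 51):
--             rendered = rendered.replace(f"{{p{idx}}}", f"${idx}")
--     else:
--         for idx in range(1, 51):
--             rendered = rendered.replace(f"{{p{idx}}}", "?")
--     return rendered
-- ===== SOURCE B (Python) =====
-- _VALID = {str(i) for i in range(1, 51)}
--
--
-- def _render_sql(sql: str, backend: str) -> str: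
--     # Single left-to-right scan instead of 50 whole-string replace passes.
--     out = []
--     i, n = 0, len(sql)
--     while i < n:
--         if sql[i] == "{" and sql[i + 1:i + 2] == "p":
--             j = i + 2
--             while j < n and sql[j].isdigit():
--                 j += 1
--             d = sql[i + 2:j]
--             if j < n and sql[j] == "}" and d in _VALID:
--                 out.append("$" + d if backend == "postgres" else "?")
--                 i = j + 1
--                 continue
--         out.append(sql[i])
--         i += 1
--     return "".join(out)
-- ===== Notes on version B (the rewrite author's own statement) =====
-- stated objective: idiomatic
-- what changed: Replaces the 50 sequential whole-string str.replace passes with one left-to-right scan that recognises a {pN} placeholder in place (digits run, closing brace, N in the precomputed set str(1)..str(50)) and emits $N or ? directly.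
import Mathlib
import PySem

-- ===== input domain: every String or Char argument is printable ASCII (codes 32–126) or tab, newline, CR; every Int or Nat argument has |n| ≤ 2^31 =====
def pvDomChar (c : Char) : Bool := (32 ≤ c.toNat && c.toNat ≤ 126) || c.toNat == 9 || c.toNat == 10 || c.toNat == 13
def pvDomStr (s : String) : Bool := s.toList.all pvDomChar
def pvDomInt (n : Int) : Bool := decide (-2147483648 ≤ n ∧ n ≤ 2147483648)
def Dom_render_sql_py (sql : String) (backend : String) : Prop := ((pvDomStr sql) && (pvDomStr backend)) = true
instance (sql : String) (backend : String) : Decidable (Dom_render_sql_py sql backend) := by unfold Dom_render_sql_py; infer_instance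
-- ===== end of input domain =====

-- B replaces A's 50 sequential whole-string replace passes by one left-to-right scan
-- that recognises a {pN} placeholder (N in str(1)..str(50)) in place; return values proved equal.


-- ===== PORT A =====
-- for idx in range(1,51): rendered = rendered.replace("{p%d}" % idx, …)
def render_sql_py (sql : String) (backend : String) : String :=
  if backend == "postgres" then
    (PySem.List.pyRange 1 51 1).foldl
      (fun rendered idx => PySem.Str.replace rendered ("{p" ++ PySem.Int.toStr idx ++ "}") ("$" ++ PySem.Int.toStr idx)) sql
  else
    (PySem.List.pyRange 1 51 1).foldl
      (fun rendered idx => PySem.Str.replace rendered ("{p" ++ PySem.Int.toStr idx ++ "}") "?") sql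

-- ===== PORT B =====
-- _VALID = {str(i) for i in range(1, 51)}
def pvValid : PySem.Set String := PySem.Set.ofList ((PySem.List.pyRange 1 51 1).map (fun i => PySem.Int.toStr i))

-- the while loop of Source B: one pass, char by char ('{','p', digit run, '}', membership in _VALID)
def pvScan (backend : String) (l : List Char) : List Char :=
  match l with
  | [] => []
  | c :: cs =>
    if c = '{' ∧ cs.head? = some 'p' then
      match h : cs.tail.dropWhile PySem.Chars.isdigit with
      | '}' :: tail =>
        if pvValid.contains (String.ofList (cs.tail.takeWhile PySem.Chars.isdigit)) then
          (if backend == "postgres" then '$' :: cs.tail.takeWhile PySem.Chars.isdigit else ['?']) ++ pvScan backend tail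
        else c :: pvScan backend cs
      | _ => c :: pvScan backend cs
    else c :: pvScan backend cs
termination_by l.length
decreasing_by
  · have h1 := List.length_dropWhile_le (p := PySem.Chars.isdigit) (l := cs.tail)
    rw [h] at h1
    have h2 : cs.tail.length ≤ cs.length := by cases cs <;> simp
    simp at h1 ⊢
    omega
  · simp
  · simp
  · simp

def render_sql_py_alt (sql : String) (backend : String) : String :=
  String.ofList (pvScan backend sql.toList)

-- ===== PRECONDITION & SPEC =====
def Spec_render_sql_py (sql : String) (backend : String) (out : String) : Prop := out = render_sql_py_alt sql backend
instance (sql : String) (backend : String) (out : String) : Decidable (Spec_render_sql_py sql backend out) := by unfold Spec_render_sql_py; infer_instance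

-- ===== CLAIM (what is proved, stated in full; the proofs are below) =====
def Claim_equal_render_sql_py : Prop := ∀ (sql : String) (backend : String), Dom_render_sql_py sql backend → Spec_render_sql_py sql backend (render_sql_py sql backend)

-- ===== LEMMAS AND PROOFS =====

-- proof-side abbreviations
def pvKs : List Int := PySem.List.pyRange 1 51 1
def pvDigs (k : Int) : List Char := (PySem.Int.toStr k).toList
def pvPat (k : Int) : List Char := '{' :: 'p' :: (pvDigs k ++ ['}'])
def pvRep (backend : String) (d : List Char) : List Char := if backend == "postgres" then '$' :: d else ['?']

-- fuel-free recursive form of PySem.Chars.replace (for nonempty old)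
def replF (old new : List Char) (l : List Char) : List Char :=
  match l with
  | [] => []
  | c :: t =>
    if old.isPrefixOf (c :: t) then new ++ replF old new (List.drop (max old.length 1) (c :: t))
    else c :: replF old new t
termination_by l.length
decreasing_by
  all_goals (simp [List.length_drop]; try omega)

def foldP (backend : String) (l : List Char) : List Char :=
  pvKs.foldl (fun r k => replF (pvPat k) (pvRep backend (pvDigs k)) r) l


-- ---- replace = replF ----
theorem pv_go_eq (old new : List Char) (ho : old ≠ []) :
    ∀ (fuel : Nat) (l acc : List Char), l.length ≤ fuel →
      PySem.Chars.replace.go old new fuel l acc = acc.reverse ++ replF old new l := by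
  intro fuel
  induction fuel with
  | zero =>
    intro l acc hl
    have : l = [] := by cases l <;> simp_all
    subst this
    rw [PySem.Chars.replace.go.eq_def]
    simp [replF]
  | succ n ih =>
    intro l acc hl
    cases l with
    | nil => rw [PySem.Chars.replace.go.eq_def]; simp [replF]
    | cons c t =>
      rw [PySem.Chars.replace.go.eq_def]
      by_cases hp : old.isPrefixOf (c :: t) = true
      · simp only [hp, if_true]
        have hlen : (List.drop old.length (c :: t)).length ≤ n := by
          have : 1 ≤ old.length := by cases old <;> simp_all
          simp [List.length_drop] at *
          omega
        rw [ih _ _ hlen]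
        have hmax : max old.length 1 = old.length := by
          have : 1 ≤ old.length := by cases old <;> simp_all
          omega
        rw [replF]
        simp [hp, hmax]
      · simp only [hp]
        have hlen : t.length ≤ n := by simp at hl; omega
        rw [ih _ _ hlen]
        rw [replF]
        simp [hp]


theorem pv_replace_eq (old new l : List Char) (ho : old ≠ []) :
    PySem.Chars.replace l old new = replF old new l := by
  unfold PySem.Chars.replace
  rw [if_neg (by simpa using ho)]
  simpa using pv_go_eq old new ho l.length l [] (le_refl _)


-- ---- structural lemmas about replF ----
theorem pv_replF_nil (old new : List Char) : replF old new [] = [] := by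
  rw [replF]


theorem pv_replF_pos (old new l : List Char) (ho : old ≠ []) (h : old.isPrefixOf l = true) :
    replF old new l = new ++ replF old new (List.drop old.length l) := by
  cases l with
  | nil => simp at h; simp_all
  | cons c t =>
    have hmax : max old.length 1 = old.length := by
      have : 1 ≤ old.length := by cases old <;> simp_all
      omega
    rw [replF]
    simp [h, hmax]


theorem pv_replF_neg (old new : List Char) (c : Char) (t : List Char)
    (h : old.isPrefixOf (c :: t) = false) :
    replF old new (c :: t) = c :: replF old new t := by
  rw [replF]
  simp [h]


theorem pv_replF_append (old new b rest : List Char)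
    (h : ∀ s : List Char, s ≠ [] → s <:+ b → ¬ (old <+: (s ++ rest))) :
    replF old new (b ++ rest) = b ++ replF old new rest := by
  induction b with
  | nil => simp
  | cons c b' ih =>
    have hnp : old.isPrefixOf (c :: (b' ++ rest)) = false := by
      have := h (c :: b') (by simp) (List.suffix_refl _)
      rw [Bool.eq_false_iff]
      intro hh
      exact this (by simpa using List.isPrefixOf_iff_prefix.mp hh)
    have : replF old new ((c :: b') ++ rest) = c :: replF old new (b' ++ rest) := by
      simpa using pv_replF_neg old new c (b' ++ rest) hnp
    rw [this, ih (fun s hs hsb => h s hs (hsb.trans (List.suffix_cons c b')))]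
    simp


theorem pv_prefix_replF (old new : List Char) (c0 : Char) (cs0 : List Char)
    (hn : new = c0 :: cs0) (hc0 : c0 = '$' ∨ c0 = '?')
    (t : List Char) (ht : ∀ c ∈ t, c ≠ '$' ∧ c ≠ '?') :
    ∀ z : List Char, t <+: replF old new z → t <+: z := by
  intro z
  have hz : ∀ n : Nat, ∀ (t z : List Char), (∀ c ∈ t, c ≠ '$' ∧ c ≠ '?') → z.length ≤ n → t <+: replF old new z → t <+: z := by
    intro n
    induction n with
    | zero =>
      intro t z ht hlen hpre
      have : z = [] := by cases z <;> simp_all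
      subst this
      simpa [pv_replF_nil] using hpre
    | succ n ih =>
      intro t z ht hlen hpre
      cases z with
      | nil => simpa [pv_replF_nil] using hpre
      | cons c t' =>
        by_cases hp : old.isPrefixOf (c :: t') = true
        · rw [replF] at hpre
          simp only [hp, if_true] at hpre
          cases t with
          | nil => exact List.nil_prefix
          | cons a t2 =>
            rw [hn] at hpre
            have : a = c0 := (List.cons_prefix_cons.mp hpre).1
            have := ht a (by simp)
            rcases hc0 with h1 | h1 <;> simp_all
        · rw [pv_replF_neg old new c t' (Bool.eq_false_iff.mpr hp)] at hpre
          cases t with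
          | nil => exact List.nil_prefix
          | cons a t2 =>
            rcases List.cons_prefix_cons.mp hpre with ⟨rfl, hrest⟩
            have ht2 : ∀ x ∈ t2, x ≠ '$' ∧ x ≠ '?' := fun x hx => ht x (by simp [hx])
            have hlen2 : t'.length ≤ n := by simp at hlen; omega
            exact List.cons_prefix_cons.mpr ⟨rfl, ih t2 t' ht2 hlen2 hrest⟩
  exact hz z.length t z ht (le_refl _)


-- ---- facts about the 50 patterns (decided on the concrete list) ----
theorem pv_digs_digit : ∀ k ∈ pvKs, ∀ c ∈ pvDigs k, PySem.Chars.isdigit c = true := by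
  have hb : (pvKs.all fun k => (pvDigs k).all PySem.Chars.isdigit) = true := by decide
  intro k hk c hc
  have := List.all_eq_true.mp hb k hk
  exact List.all_eq_true.mp this c hc


theorem pv_digs_inj : ∀ j ∈ pvKs, ∀ k ∈ pvKs, pvDigs j = pvDigs k → j = k := by
  have hb : (pvKs.all fun j => pvKs.all fun k => ((pvDigs j == pvDigs k) == (j == k))) = true := by decide
  intro j hj k hk hd
  have h1 := List.all_eq_true.mp (List.all_eq_true.mp hb j hj) k hk
  have h2 : (pvDigs j == pvDigs k) = true := by simp [hd]
  rw [h2] at h1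
  simpa using h1.symm


theorem pv_digit_ne (c : Char) (h : PySem.Chars.isdigit c = true) :
    c ≠ '{' ∧ c ≠ 'p' ∧ c ≠ '}' ∧ c ≠ '$' ∧ c ≠ '?' := by
  refine ⟨?_, ?_, ?_, ?_, ?_⟩ <;> rintro rfl <;> revert h <;> decide


theorem pv_valid_iff (d : List Char) :
    pvValid.contains (String.ofList d) = true ↔ ∃ k ∈ pvKs, pvDigs k = d := by
  unfold pvValid
  unfold PySem.Set.contains
  rw [List.contains_iff_mem]
  rw [show (String.ofList d ∈ PySem.Set.ofList ((PySem.List.pyRange 1 51 1).map (fun i => PySem.Int.toStr i))) ↔ String.ofList d ∈ ((PySem.List.pyRange 1 51 1).map (fun i => PySem.Int.toStr i)) from PySem.Set.mem_ofList _ _]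
  simp only [List.mem_map]
  constructor
  · rintro ⟨k, hk, hks⟩
    refine ⟨k, hk, ?_⟩
    have := congrArg String.toList hks
    simpa [pvDigs] using this
  · rintro ⟨k, hk, hks⟩
    refine ⟨k, hk, ?_⟩
    have := congrArg String.ofList hks
    simpa [pvDigs] using this


-- ---- digit-run / prefix combinatorics ----
theorem pv_takeWhile_digits (ds : List Char) (hd : ∀ c ∈ ds, PySem.Chars.isdigit c = true)
    (rest : List Char) :
    (ds ++ '}' :: rest).takeWhile PySem.Chars.isdigit = ds ∧
    (ds ++ '}' :: rest).dropWhile PySem.Chars.isdigit = '}' :: rest := by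
  induction ds with
  | nil => simp; decide
  | cons c cs ih =>
    have hc : PySem.Chars.isdigit c = true := hd c (by simp)
    have ihr := ih (fun x hx => hd x (by simp [hx]))
    simp [List.takeWhile_cons, List.dropWhile_cons, hc, ihr.1, ihr.2]


theorem pv_digits_brace_prefix (d1 d2 r : List Char)
    (h1 : ∀ c ∈ d1, PySem.Chars.isdigit c = true) (h2 : ∀ c ∈ d2, PySem.Chars.isdigit c = true)
    (hp : (d1 ++ ['}']) <+: (d2 ++ '}' :: r)) : d1 = d2 := by
  induction d1 generalizing d2 with
  | nil =>
    cases d2 with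
    | nil => rfl
    | cons b d2' =>
      exfalso
      have hb : PySem.Chars.isdigit b = true := h2 b (by simp)
      have hbe : '}' = b := by simpa using hp
      exact (pv_digit_ne b hb).2.2.1 hbe.symm
  | cons a d1' ih =>
    cases d2 with
    | nil =>
      exfalso
      have ha : PySem.Chars.isdigit a = true := h1 a (by simp)
      have hbe : a = '}' := (by simpa using hp : a = '}' ∧ d1' ++ ['}'] <+: r).1
      exact (pv_digit_ne a ha).2.2.1 hbe
    | cons b d2' =>
      rcases List.cons_prefix_cons.mp (by simpa using hp) with ⟨rfl, hrest⟩
      have := ih d2' (fun x hx => h1 x (by simp [hx])) (fun x hx => h2 x (by simp [hx])) hrest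
      rw [this]


theorem pv_pat_overlap (j k : Int) (hj : j ∈ pvKs) (hk : k ∈ pvKs) (r : List Char)
    (hp : pvPat j <+: (pvPat k ++ r)) : j = k := by
  unfold pvPat at hp
  have hp2 : pvDigs j ++ ['}'] <+: pvDigs k ++ '}' :: r := by simpa using hp
  have hd := pv_digits_brace_prefix (pvDigs j) (pvDigs k) r (pv_digs_digit j hj) (pv_digs_digit k hk) hp2
  exact pv_digs_inj j hj k hk hd


-- ---- fold lemmas ----


-- ---- bridging A's port to foldP ----



set_option maxRecDepth 16384 in
set_option maxHeartbeats 2000000 in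
theorem pvScan_match (backend : String) (k : Int) (hk : k ∈ pvKs) (rest : List Char) :
    pvScan backend (pvPat k ++ rest) = pvRep backend (pvDigs k) ++ pvScan backend rest := by
  have hdig := pv_digs_digit k hk
  have htw := pv_takeWhile_digits (pvDigs k) hdig rest
  have hl : pvPat k ++ rest = '{' :: 'p' :: (pvDigs k ++ '}' :: rest) := by
    simp [pvPat]
  rw [hl]
  rw [pvScan.eq_def]
  dsimp only
  rw [if_pos (by simp)]
  split
  · rename_i tail h
    simp only [List.tail_cons] at h
    rw [htw.2] at h
    injection h with h1 h2
    subst h2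
    rw [if_pos]
    · simp only [List.tail_cons]
      rw [htw.1]
      rfl
    · simp only [List.tail_cons]
      rw [htw.1]
      exact (pv_valid_iff (pvDigs k)).mpr ⟨k, hk, rfl⟩
  · rename_i hne
    exact absurd (by simpa using htw.2) (by simpa using hne rest)

theorem pv_block_no_pat (j : Int) (body s rest : List Char) (hb : '{' ∉ body)
    (hs : s ≠ []) (hsuf : s <:+ body) : ¬ (pvPat j <+: s ++ rest) := by
  cases s with
  | nil => simp at hs
  | cons a t =>
    intro hp
    have ha : a ∈ body := hsuf.subset (by simp)
    have h1 : '{' = a := (List.cons_prefix_cons.mp (by simpa [pvPat] using hp)).1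
    exact hb (h1 ▸ ha)

theorem pv_body_no_lbrace (k : Int) (hk : k ∈ pvKs) : '{' ∉ ('p' :: (pvDigs k ++ ['}'])) := by
  intro hm
  rcases List.mem_cons.mp hm with h1 | hm2
  · exact absurd h1 (by decide)
  · rcases List.mem_append.mp hm2 with h2 | h3
    · exact absurd (pv_digs_digit k hk '{' h2) (by decide)
    · exact absurd (List.mem_singleton.mp h3) (by decide)

theorem pv_rep_no_lbrace (backend : String) (k : Int) (hk : k ∈ pvKs) :
    '{' ∉ pvRep backend (pvDigs k) := by
  unfold pvRep
  split
  · intro hm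
    simp at hm
    exact absurd (pv_digs_digit k hk '{' hm) (by decide)
  · intro hm
    simp at hm

theorem pv_rep_shape (backend : String) (d : List Char) :
    ∃ cs0, (pvRep backend d = '$' :: cs0 ∨ pvRep backend d = '?' :: cs0) := by
  unfold pvRep
  split
  · exact ⟨d, Or.inl rfl⟩
  · exact ⟨[], Or.inr rfl⟩

theorem pv_tail_chars (k : Int) (hk : k ∈ pvKs) :
    ∀ x ∈ ('p' :: (pvDigs k ++ ['}'])), x ≠ '$' ∧ x ≠ '?' := by
  intro x hx
  simp at hx
  rcases hx with rfl | hx | rfl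
  · exact ⟨by decide, by decide⟩
  · have h := pv_digit_ne x (pv_digs_digit k hk x hx)
    exact ⟨h.2.2.2.1, h.2.2.2.2⟩
  · exact ⟨by decide, by decide⟩

theorem pv_step_pres (backend : String) (j0 : Int) (c : Char) (Z : List Char)
    (h : ∀ j ∈ pvKs, ¬ (pvPat j <+: c :: Z)) :
    ∀ j ∈ pvKs, ¬ (pvPat j <+: c :: replF (pvPat j0) (pvRep backend (pvDigs j0)) Z) := by
  intro j hj hp
  have hc := List.cons_prefix_cons.mp (by simpa [pvPat] using hp)
  rcases hc with ⟨hc1, htp⟩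
  rcases pv_rep_shape backend (pvDigs j0) with ⟨cs0, hshape⟩
  have hpres : ('p' :: (pvDigs j ++ ['}'])) <+: Z := by
    rcases hshape with hs | hs
    · exact pv_prefix_replF _ _ '$' cs0 hs (Or.inl rfl) _ (pv_tail_chars j hj) Z htp
    · exact pv_prefix_replF _ _ '?' cs0 hs (Or.inr rfl) _ (pv_tail_chars j hj) Z htp
  apply h j hj
  rw [← hc1, pvPat]
  exact List.cons_prefix_cons.mpr ⟨rfl, hpres⟩

theorem pv_fold_skip (backend : String) (js : List Int) (b : List Char)
    (hb : ∀ rest : List Char, ∀ s : List Char, s ≠ [] → s <:+ b → ∀ j ∈ js, ¬ (pvPat j <+: s ++ rest)) :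
    ∀ rest : List Char,
      js.foldl (fun r k => replF (pvPat k) (pvRep backend (pvDigs k)) r) (b ++ rest)
        = b ++ js.foldl (fun r k => replF (pvPat k) (pvRep backend (pvDigs k)) r) rest := by
  induction js with
  | nil => intro rest; simp
  | cons j0 js' ih =>
    intro rest
    rw [List.foldl_cons, List.foldl_cons]
    rw [pv_replF_append _ _ b rest (fun s hs hsuf => hb rest s hs hsuf j0 (by simp))]
    exact ih (fun rest s hs hsuf j hj => hb rest s hs hsuf j (by simp [hj])) _

theorem pv_fold_cons (backend : String) (c : Char) :
    ∀ js : List Int, (∀ j ∈ js, j ∈ pvKs) → ∀ Z : List Char,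
      (∀ j ∈ pvKs, ¬ (pvPat j <+: c :: Z)) →
      js.foldl (fun r k => replF (pvPat k) (pvRep backend (pvDigs k)) r) (c :: Z)
        = c :: js.foldl (fun r k => replF (pvPat k) (pvRep backend (pvDigs k)) r) Z := by
  intro js
  induction js with
  | nil => intro _ Z _; simp
  | cons j0 js' ih =>
    intro hsub Z hinv
    rw [List.foldl_cons, List.foldl_cons]
    have hnp : (pvPat j0).isPrefixOf (c :: Z) = false :=
      Bool.eq_false_iff.mpr (fun hh => hinv j0 (hsub j0 (by simp)) (List.isPrefixOf_iff_prefix.mp hh))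
    rw [pv_replF_neg _ _ _ _ hnp]
    exact ih (fun j hj => hsub j (by simp [hj])) _ (pv_step_pres backend j0 c Z hinv)

theorem pv_fold_nil (backend : String) (js : List Int) :
    js.foldl (fun r k => replF (pvPat k) (pvRep backend (pvDigs k)) r) [] = [] := by
  induction js with
  | nil => rfl
  | cons j js' ih => rw [List.foldl_cons, pv_replF_nil]; exact ih

theorem pv_foldP_match (backend : String) (k : Int) (hk : k ∈ pvKs) (rest : List Char) :
    foldP backend (pvPat k ++ rest) = pvRep backend (pvDigs k) ++ foldP backend rest := by
  obtain ⟨ks1, ks2, hsplit⟩ := List.append_of_mem hk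
  have hnd : pvKs.Nodup := by unfold pvKs; exact PySem.List.nodup_pyRange_one 1 51
  have hk1 : k ∉ ks1 := by
    rw [hsplit] at hnd
    rcases List.nodup_append.mp hnd with ⟨-, -, hdisj⟩
    exact fun hmem => hdisj k hmem k (by simp) rfl
  have hsub1 : ∀ j ∈ ks1, j ∈ pvKs := by intro j hj; rw [hsplit]; simp [hj]
  have hcond1 : ∀ rest' : List Char, ∀ s : List Char, s ≠ [] → s <:+ pvPat k →
      ∀ j ∈ ks1, ¬ (pvPat j <+: s ++ rest') := by
    intro rest' s hs hsuf j hj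
    rcases List.suffix_cons_iff.mp hsuf with heq | hsuf'
    · intro hp
      have hp' : pvPat j <+: pvPat k ++ rest' := by rw [pvPat]; rw [heq] at hp; exact hp
      have : j = k := pv_pat_overlap j k (hsub1 j hj) hk rest' hp'
      exact hk1 (this ▸ hj)
    · exact pv_block_no_pat j _ s rest' (pv_body_no_lbrace k hk) hs hsuf'
  have hcond2 : ∀ rest' : List Char, ∀ s : List Char, s ≠ [] → s <:+ pvRep backend (pvDigs k) →
      ∀ j ∈ ks2, ¬ (pvPat j <+: s ++ rest') := by
    intro rest' s hs hsuf j hj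
    exact pv_block_no_pat j _ s rest' (pv_rep_no_lbrace backend k hk) hs hsuf
  unfold foldP
  rw [hsplit, List.foldl_append, List.foldl_cons, List.foldl_append, List.foldl_cons]
  rw [pv_fold_skip backend ks1 (pvPat k) hcond1 rest]
  have hpf : (pvPat k).isPrefixOf (pvPat k ++ (ks1.foldl (fun r k' => replF (pvPat k') (pvRep backend (pvDigs k')) r) rest)) = true :=
    List.isPrefixOf_iff_prefix.mpr (List.prefix_append _ _)
  rw [pv_replF_pos _ _ _ (by simp [pvPat]) hpf, List.drop_left]
  rw [pv_fold_skip backend ks2 (pvRep backend (pvDigs k)) hcond2]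

set_option maxRecDepth 16384 in
theorem pvScan_nomatch (backend : String) (c : Char) (cs : List Char)
    (hex : ∀ j ∈ pvKs, ¬ (pvPat j <+: c :: cs)) :
    pvScan backend (c :: cs) = c :: pvScan backend cs := by
  rw [pvScan.eq_def]
  dsimp only
  by_cases hc : c = '{' ∧ cs.head? = some 'p'
  · rw [if_pos hc]
    obtain ⟨rfl, hh⟩ := hc
    have hcs : cs = 'p' :: cs.tail := by
      cases cs with
      | nil => simp at hh
      | cons a t => simp at hh; simp [hh]
    split
    · rename_i tail h
      by_cases hv : pvValid.contains (String.ofList (cs.tail.takeWhile PySem.Chars.isdigit)) = true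
      · exfalso
        rcases (pv_valid_iff _).mp hv with ⟨k, hk, hdk⟩
        apply hex k hk
        have hsplit : cs.tail = cs.tail.takeWhile PySem.Chars.isdigit ++ '}' :: tail := by
          conv_lhs => rw [← List.takeWhile_append_dropWhile (p := PySem.Chars.isdigit) (l := cs.tail)]
          rw [h]
        refine ⟨tail, ?_⟩
        rw [pvPat, hdk]
        conv_rhs => rw [hcs, hsplit]
        simp
      · rw [if_neg hv]
    · rfl
  · rw [if_neg hc]

set_option maxRecDepth 16384 in
theorem pv_fold_eq_scan_aux (backend : String) :
    ∀ n : Nat, ∀ l : List Char, l.length ≤ n → foldP backend l = pvScan backend l := by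
  intro n
  induction n with
  | zero =>
    intro l hl
    have : l = [] := by cases l <;> simp_all
    subst this
    rw [pvScan]
    exact pv_fold_nil backend pvKs
  | succ n ih =>
    intro l hl
    by_cases hex : ∃ k, k ∈ pvKs ∧ pvPat k <+: l
    · rcases hex with ⟨k, hk, hpre⟩
      rcases hpre with ⟨rest, hrest⟩
      subst hrest
      have hlen : rest.length ≤ n := by
        have h1 : 1 ≤ (pvPat k).length := by simp [pvPat]
        simp [List.length_append] at hl
        omega
      rw [pv_foldP_match backend k hk rest, pvScan_match backend k hk rest, ih rest hlen]
    · push_neg at hex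
      cases l with
      | nil =>
        rw [pvScan]
        exact pv_fold_nil backend pvKs
      | cons c cs =>
        have hinv : ∀ j ∈ pvKs, ¬ (pvPat j <+: c :: cs) := fun j hj => hex j hj
        have hA := pv_fold_cons backend c pvKs (fun j hj => hj) cs hinv
        have hlen : cs.length ≤ n := by simp at hl; omega
        calc foldP backend (c :: cs) = c :: foldP backend cs := hA
          _ = c :: pvScan backend cs := by rw [ih cs hlen]
          _ = pvScan backend (c :: cs) := (pvScan_nomatch backend c cs hinv).symm

theorem pv_fold_eq_scan (backend : String) : ∀ l : List Char, foldP backend l = pvScan backend l :=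
  fun l => pv_fold_eq_scan_aux backend l.length l (le_refl _)

theorem pv_patStr (idx : Int) : ("{p" ++ PySem.Int.toStr idx ++ "}").toList = pvPat idx := by
  simp [pvPat, pvDigs]

theorem pv_foldStr (repS : Int → String) (ks : List Int) :
    ∀ s : String,
      (ks.foldl (fun r idx => PySem.Str.replace r ("{p" ++ PySem.Int.toStr idx ++ "}") (repS idx)) s).toList
        = ks.foldl (fun r idx => replF (pvPat idx) ((repS idx).toList) r) s.toList := by
  induction ks with
  | nil => intro s; rfl
  | cons k ks' ih =>
    intro s
    rw [List.foldl_cons, List.foldl_cons, ih]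
    congr 1
    rw [PySem.Str.toList_replace, pv_patStr]
    exact pv_replace_eq _ _ _ (by simp [pvPat])

theorem pv_A_eq_foldP (sql backend : String) :
    (render_sql_py sql backend).toList = foldP backend sql.toList := by
  unfold render_sql_py foldP pvKs
  by_cases hb : (backend == "postgres") = true
  · rw [if_pos hb]
    rw [pv_foldStr (fun idx => "$" ++ PySem.Int.toStr idx) _ sql]
    apply PySem.List.foldl_congr_mem
    intro acc x hx
    congr 1
    unfold pvRep
    rw [if_pos hb]
    simp [pvDigs]
  · rw [if_neg hb]
    rw [pv_foldStr (fun _ => "?") _ sql]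
    apply PySem.List.foldl_congr_mem
    intro acc x hx
    congr 1
    unfold pvRep
    rw [if_neg hb]
    decide

-- ===== VERDICT (by name: the statement is the Claim_ definition above) =====
theorem render_sql_py_spec : Claim_equal_render_sql_py := by
  intro sql backend _
  unfold Spec_render_sql_py
  have h1 := pv_A_eq_foldP sql backend
  have h2 := pv_fold_eq_scan backend sql.toList
  have h3 : (render_sql_py sql backend).toList = (render_sql_py_alt sql backend).toList := by
    rw [h1, h2]
    simp [render_sql_py_alt]
  calc render_sql_py sql backend = String.ofList (render_sql_py sql backend).toList := by simp
    _ = String.ofList (render_sql_py_alt sql backend).toList := by rw [h3]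
    _ = render_sql_py_alt sql backend := by simp
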